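-- pv_equiv track=rewrite | github.com/mwisnowski/mtg_python_deckbuilder | code/web/routes/build_partners.py | _color_code
-- ===== SOURCE A (Python) =====
-- from typing import Any, Iterable
--
-- _WUBRG_ORDER = ["W", "U", "B", "R", "G"]
--
-- def _color_code(identity: Iterable[str]) -> str:
--     """Convert color identity to standard WUBRG-ordered code."""
--     colors = [str(c).strip().upper() for c in identity if str(c).strip()]
--     if not colors:
--         return "C"
--     ordered: list[str] = [c for c in _WUBRG_ORDER if c in colors]
--     for color in colors:
--         if color not in ordered:
--             ordered.append(color)
--     return "".join(ordered) or "C"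
-- ===== SOURCE B (Python) =====
-- _BIT = {"W": 1, "U": 2, "B": 4, "R": 8, "G": 16}
--
-- # _MASK_CODE[m] = WUBRG-ordered code of the colors whose bits are set in m
-- _MASK_CODE = [
--     "", "W", "U", "WU", "B", "WB", "UB", "WUB",
--     "R", "WR", "UR", "WUR", "BR", "WBR", "UBR", "WUBR",
--     "G", "WG", "UG", "WUG", "BG", "WBG", "UBG", "WUBG",
--     "RG", "WRG", "URG", "WURG", "BRG", "WBRG", "UBRG", "WUBRG",
-- ]
--
-- def _color_code(identity):
--     """Convert color identity to standard WUBRG-ordered code."""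
--     mask = 0
--     foreign = {}
--     for c in identity:
--         s = str(c).strip().upper()
--         if s:
--             if s in _BIT:
--                 mask |= _BIT[s]
--             else:
--                 foreign[s] = None
--     return (_MASK_CODE[mask] + "".join(foreign)) or "C"
-- ===== Notes on version B (the rewrite author's own statement) =====
-- stated objective: faster
-- what changed: Replaces A's list passes (build a cleaned colors list, filter WUBRG by O(n) membership in it, then a dedup-append loop with O(n) list scans) with a bitmask accumulated over the input, a precomputed 32-entry table mapping the mask to its WUBRG-ordered code, and a dict used as an ordered set for the unknown codes (O(1) mask/dict updates).
import Mathlib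
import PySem

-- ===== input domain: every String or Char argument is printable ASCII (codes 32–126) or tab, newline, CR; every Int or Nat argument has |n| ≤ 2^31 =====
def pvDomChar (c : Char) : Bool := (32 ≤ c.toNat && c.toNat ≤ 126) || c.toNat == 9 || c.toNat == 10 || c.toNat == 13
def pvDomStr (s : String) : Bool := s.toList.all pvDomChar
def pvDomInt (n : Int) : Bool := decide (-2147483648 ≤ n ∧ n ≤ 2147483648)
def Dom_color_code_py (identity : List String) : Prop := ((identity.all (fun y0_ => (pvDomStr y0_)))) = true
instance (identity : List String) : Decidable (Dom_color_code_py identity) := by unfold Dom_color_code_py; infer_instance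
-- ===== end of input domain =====

-- B replaces A's list passes (cleaned list, filter WUBRG by membership, dedup-append loop) by a
-- WUBRG bitmask + precomputed 32-entry code table plus a dict used as an ordered set for unknown
-- codes; objective: faster (O(1) mask/dict updates instead of repeated list scans; measured by the
-- timing run), same result.

-- ===== PORT A =====
def pyWUBRG : List String := ["W", "U", "B", "R", "G"]

def color_code_py (identity : List String) : String :=
  -- colors = [str(c).strip().upper() for c in identity if str(c).strip()]
  let colors := (identity.filter (fun c => PySem.Str.strip c ≠ "")).map
      (fun c => PySem.Str.upper (PySem.Str.strip c))
  if colors = [] then "C"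
  else
    -- ordered = [c for c in _WUBRG_ORDER if c in colors]
    let ordered := pyWUBRG.filter (fun c => colors.contains c)
    -- for color in colors: if color not in ordered: ordered.append(color)
    let ordered := colors.foldl
        (fun acc color => if acc.contains color then acc else acc ++ [color]) ordered
    let r := PySem.Str.join "" ordered
    if r = "" then "C" else r

-- ===== PORT B =====
-- _BIT = {"W": 1, "U": 2, "B": 4, "R": 8, "G": 16}
def pyBit : PySem.Dict String Nat :=
  PySem.Dict.ofList [("W", 1), ("U", 2), ("B", 4), ("R", 8), ("G", 16)]

-- _MASK_CODE (module constant)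
def pyMaskCode : List String :=
  ["", "W", "U", "WU", "B", "WB", "UB", "WUB",
   "R", "WR", "UR", "WUR", "BR", "WBR", "UBR", "WUBR",
   "G", "WG", "UG", "WUG", "BG", "WBG", "UBG", "WUBG",
   "RG", "WRG", "URG", "WURG", "BRG", "WBRG", "UBRG", "WUBRG"]

def color_code_py_alt (identity : List String) : String :=
  -- mask = 0; foreign = {}; loop: mask |= _BIT[s] / foreign[s] = None
  let st := identity.foldl
      (fun (st : Nat × PySem.Dict String Unit) c =>
        let s := PySem.Str.upper (PySem.Str.strip c)
        if s = "" then st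
        else if (pyBit.get? s).isSome then (st.1 ||| pyBit.getD s 0, st.2)
        else (st.1, st.2.insert s ()))
      (0, PySem.Dict.empty)
  -- _MASK_CODE[mask] + "".join(foreign): mask < 32 always, so plain list indexing is exact here
  let r := pyMaskCode.getD st.1 "" ++ PySem.Str.join "" (PySem.Dict.keys st.2)
  if r = "" then "C" else r

-- ===== PRECONDITION & SPEC =====
def Spec_color_code_py (identity : List String) (out : String) : Prop := out = color_code_py_alt identity
instance (identity : List String) (out : String) : Decidable (Spec_color_code_py identity out) := by unfold Spec_color_code_py; infer_instance

-- ===== CLAIM (what is proved, stated in full; the proofs are below) =====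
def Claim_equal_color_code_py : Prop := ∀ (identity : List String), Dom_color_code_py identity → Spec_color_code_py identity (color_code_py identity)

-- ===== LEMMAS AND PROOFS =====

-- the cleaned color list both programs effectively process
def pvClean (identity : List String) : List String :=
  identity.filterMap (fun c =>
    if PySem.Str.strip c = "" then none else some (PySem.Str.upper (PySem.Str.strip c)))

-- the two component folds B's single pass splits into
def pvFoldM (m : Nat) (l : List String) : Nat :=
  l.foldl (fun m s => if (pyBit.get? s).isSome then m ||| pyBit.getD s 0 else m) m

def pvFoldD (d : PySem.Dict String Unit) (l : List String) : PySem.Dict String Unit :=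
  l.foldl (fun d s => if (pyBit.get? s).isSome then d else d.insert s ()) d

-- the mask determined by which WUBRG letters occur in l
def pvMaskOf (l : List String) : Nat :=
  (if "W" ∈ l then 1 else 0) ||| (if "U" ∈ l then 2 else 0) ||| (if "B" ∈ l then 4 else 0)
    ||| (if "R" ∈ l then 8 else 0) ||| (if "G" ∈ l then 16 else 0)

lemma pvBit_isSome (s : String) : (pyBit.get? s).isSome = pyWUBRG.contains s := by
  by_cases h1 : s="W" <;> by_cases h2 : s="U" <;> by_cases h3 : s="B" <;>
    by_cases h4 : s="R" <;> by_cases h5 : s="G" <;>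
    simp_all [pyBit, pyWUBRG, PySem.Dict.ofList, PySem.Dict.get?, PySem.Dict.update,
      PySem.Dict.insert, PySem.Dict.empty]
  exact ⟨fun h => h1 h.symm, fun h => h2 h.symm, fun h => h3 h.symm,
      fun h => h4 h.symm, fun h => h5 h.symm⟩

lemma pvUpperNe (c : String) (h : PySem.Str.strip c ≠ "") :
    PySem.Str.upper (PySem.Str.strip c) ≠ "" := by
  intro he
  apply h
  have h2 := congrArg String.toList he
  simp only [PySem.Str.toList_upper, PySem.Str.toList_strip, String.toList_empty,
    PySem.Chars.upper, List.map_eq_nil_iff] at h2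
  have h3 : (PySem.Str.strip c).toList = ([] : List Char) := by
    rw [PySem.Str.toList_strip, h2]
  cases hq : PySem.Str.strip c with | _ l => simp_all

lemma pvClean_eq (identity : List String) :
    (identity.filter (fun c => PySem.Str.strip c ≠ "")).map
      (fun c => PySem.Str.upper (PySem.Str.strip c)) = pvClean identity := by
  induction identity with
  | nil => rfl
  | cons c l ih =>
    by_cases h : PySem.Str.strip c = "" <;>
      · simp only [pvClean, List.filter_cons, List.filterMap_cons, h, decide_not,
          decide_true, decide_false, Bool.not_true, Bool.not_false, if_true, if_false,
          List.map_cons]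
        simpa [pvClean, decide_not] using ih

lemma pvB_fold (identity : List String) (m : Nat) (d : PySem.Dict String Unit) :
    identity.foldl
      (fun (st : Nat × PySem.Dict String Unit) c =>
        let s := PySem.Str.upper (PySem.Str.strip c)
        if s = "" then st
        else if (pyBit.get? s).isSome then (st.1 ||| pyBit.getD s 0, st.2)
        else (st.1, st.2.insert s ())) (m, d)
    = (pvFoldM m (pvClean identity), pvFoldD d (pvClean identity)) := by
  induction identity generalizing m d with
  | nil => rfl
  | cons c l ih =>
    by_cases h0 : PySem.Str.strip c = ""
    · have hup : PySem.Str.upper (PySem.Str.strip c) = "" := by rw [h0]; rfl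
      simp only [List.foldl_cons, hup]
      rw [ih]
      simp [pvClean, h0]
    · have hne := pvUpperNe c h0
      simp only [List.foldl_cons, if_neg hne]
      by_cases hw : (pyBit.get? (PySem.Str.upper (PySem.Str.strip c))).isSome
      · rw [if_pos hw, ih]
        simp [pvClean, h0, pvFoldM, pvFoldD, hw]
      · rw [if_neg hw, ih]
        simp [pvClean, h0, pvFoldM, pvFoldD, hw]

lemma pvMask_cons_of_mem (s : String) (h : s ∈ pyWUBRG) (l : List String) :
    pvMaskOf (s :: l) = pyBit.getD s 0 ||| pvMaskOf l := by
  simp only [pyWUBRG, List.mem_cons, List.not_mem_nil, or_false] at h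
  rcases h with rfl | rfl | rfl | rfl | rfl <;>
    (by_cases h1 : "W" ∈ l <;> by_cases h2 : "U" ∈ l <;> by_cases h3 : "B" ∈ l <;>
      by_cases h4 : "R" ∈ l <;> by_cases h5 : "G" ∈ l <;>
      · simp [pvMaskOf, h1, h2, h3, h4, h5]
        decide)

lemma pvMask_cons_of_not_mem (s : String) (h : ¬ s ∈ pyWUBRG) (l : List String) :
    pvMaskOf (s :: l) = pvMaskOf l := by
  simp only [pyWUBRG, List.mem_cons, List.not_mem_nil, or_false, not_or] at h
  obtain ⟨h1, h2, h3, h4, h5⟩ := h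
  simp [pvMaskOf, List.mem_cons, Ne.symm h1, Ne.symm h2, Ne.symm h3, Ne.symm h4, Ne.symm h5]

lemma pvFoldM_eq (l : List String) (m : Nat) : pvFoldM m l = m ||| pvMaskOf l := by
  induction l generalizing m with
  | nil => simp [pvFoldM, pvMaskOf]
  | cons s l ih =>
    simp only [pvFoldM, List.foldl_cons] at ih ⊢
    by_cases hb : (pyBit.get? s).isSome
    · rw [if_pos hb, ih, Nat.lor_assoc, ← pvMask_cons_of_mem s ?_ l]
      rw [pvBit_isSome, List.contains_eq_mem, decide_eq_true_iff] at hb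
      exact hb
    · rw [if_neg hb, ih, pvMask_cons_of_not_mem s ?_ l]
      rw [pvBit_isSome, List.contains_eq_mem] at hb
      simpa using hb

lemma pvTable (l : List String) :
    pyMaskCode.getD (pvMaskOf l) "" = PySem.Str.join "" (pyWUBRG.filter (fun c => l.contains c)) := by
  by_cases h1 : "W" ∈ l <;> by_cases h2 : "U" ∈ l <;> by_cases h3 : "B" ∈ l <;>
    by_cases h4 : "R" ∈ l <;> by_cases h5 : "G" ∈ l <;>
    · simp [pvMaskOf, pyWUBRG, List.contains_eq_mem, h1, h2, h3, h4, h5]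
      decide

lemma pvFoldD_keys (l : List String) (d : PySem.Dict String Unit) :
    (pvFoldD d l).keys
    = l.foldl (fun F s => if pyWUBRG.contains s || F.contains s then F else F ++ [s]) d.keys := by
  induction l generalizing d with
  | nil => rfl
  | cons s l ih =>
    simp only [pvFoldD, List.foldl_cons] at ih ⊢
    by_cases hb : (pyBit.get? s).isSome
    · have hw : pyWUBRG.contains s = true := by rw [← pvBit_isSome]; exact hb
      have hmem : s ∈ pyWUBRG := by simpa [List.contains_eq_mem] using hw
      rw [if_pos hb, if_pos (by simp only [List.contains_eq_mem]; simp [hmem]), ih]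
    · have hw : pyWUBRG.contains s = false := by rw [← pvBit_isSome]; simpa using hb
      rw [if_neg hb]
      by_cases hk : s ∈ d.keys
      · have hc : d.contains s = true := (PySem.Dict.contains_iff_mem_keys d s).2 hk
        rw [if_pos (by simp [List.contains_eq_mem, hk]), ih,
          PySem.Dict.keys_insert_of_contains d () hc]
      · have hc : d.contains s = false := by
          rw [← Bool.not_eq_true]
          intro hc
          exact hk ((PySem.Dict.contains_iff_mem_keys d s).1 hc)
        have hnm : s ∉ pyWUBRG := by simpa [List.contains_eq_mem] using hw
        rw [if_neg (by simp [List.contains_eq_mem, hk, hnm]), ih,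
          PySem.Dict.keys_insert_of_not_contains d () hc]

-- A's dedup-append loop over W ++ F splits into W and a residual fold on F
lemma pvA_fold_split (l W F : List String) :
    l.foldl (fun acc c => if acc.contains c then acc else acc ++ [c]) (W ++ F)
    = W ++ l.foldl (fun F c => if W.contains c || F.contains c then F else F ++ [c]) F := by
  induction l generalizing F with
  | nil => rfl
  | cons s l ih =>
    simp only [List.foldl_cons]
    by_cases h : s ∈ W ∨ s ∈ F
    · have c1 : (W ++ F).contains s = true := by
        simp [List.contains_eq_mem, List.mem_append, h]
      have c2 : (W.contains s || F.contains s) = true := by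
        simpa [List.contains_eq_mem] using h
      rw [if_pos c1, if_pos c2]
      exact ih F
    · simp only [not_or] at h
      have c1 : ¬ (W ++ F).contains s = true := by
        simp [List.contains_eq_mem, List.mem_append, h.1, h.2]
      have c2 : ¬ (W.contains s || F.contains s) = true := by
        simp [List.contains_eq_mem, h.1, h.2]
      rw [if_neg c1, if_neg c2, List.append_assoc]
      exact ih (F ++ [s])

-- "".join distributes over ++ (empty separator), via the Chars layer
lemma pvCharsJoin_append (xs ys : List (List Char)) :
    PySem.Chars.join [] (xs ++ ys) = PySem.Chars.join [] xs ++ PySem.Chars.join [] ys := by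
  induction xs with
  | nil => simp [PySem.Chars.join_nil]
  | cons x xs ih =>
    cases xs with
    | nil =>
      cases ys with
      | nil => simp [PySem.Chars.join_singleton, PySem.Chars.join_nil]
      | cons y ys => simp [PySem.Chars.join_singleton, PySem.Chars.join_cons_cons]
    | cons x' xs' =>
      simp only [List.cons_append, PySem.Chars.join_cons_cons] at ih ⊢
      simp [ih]

lemma pvJoin_append (a b : List String) :
    PySem.Str.join "" (a ++ b) = PySem.Str.join "" a ++ PySem.Str.join "" b := by
  unfold PySem.Str.join
  rw [List.map_append, show ("".toList) = ([] : List Char) from rfl, pvCharsJoin_append,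
    String.ofList_append]

theorem pv_main (identity : List String) :
    color_code_py identity = color_code_py_alt identity := by
  unfold color_code_py color_code_py_alt
  rw [pvClean_eq, pvB_fold]
  set colors := pvClean identity with hc
  by_cases hnil : colors = []
  · rw [if_pos hnil, hnil]
    decide
  · rw [if_neg hnil]
    simp only [pvFoldM_eq, Nat.zero_or, pvTable, pvFoldD_keys, PySem.Dict.keys_empty]
    have hsplit := pvA_fold_split colors (pyWUBRG.filter (fun c => colors.contains c)) []
    rw [List.append_nil] at hsplit
    rw [hsplit]
    have hF : colors.foldl
        (fun F c => if (pyWUBRG.filter (fun c => colors.contains c)).contains c || F.contains c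
                    then F else F ++ [c]) []
        = colors.foldl (fun F s => if pyWUBRG.contains s || F.contains s then F else F ++ [s]) [] := by
      apply PySem.List.foldl_congr_mem
      intro F s hs
      have hmem : (pyWUBRG.filter (fun c => colors.contains c)).contains s
          = pyWUBRG.contains s := by
        simp only [List.contains_eq_mem, List.mem_filter, decide_eq_decide]
        constructor
        · exact fun h => h.1
        · exact fun h => ⟨h, by simpa [List.contains_eq_mem] using hs⟩
      rw [hmem]
    rw [hF, pvJoin_append]

-- ===== VERDICT (by name: the statement is the Claim_ definition above) =====
theorem color_code_py_spec : Claim_equal_color_code_py := by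
  intro identity _
  unfold Spec_color_code_py
  exact pv_main identity
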